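-- pv_equiv track=rewrite | github.com/pvtrov/algorithms-and-data-structures | exercises_from_course/to_exams_/2019_20/exam_2/zad1_zbigniew.py | function
-- ===== SOURCE A (Python) =====
-- def yes(previous, val):
--     current = []
--     for i in range(len(previous)):
--         min_ = previous[i][0] + 1
--         new_val = previous[i][1] + val - 1
--         if new_val > 0:
--             current.append([min_, new_val])
--     return current
--
-- def no(previous):
--     current = []
--     for i in range(len(previous)):
--         if previous[i][1] - 1 > 0:
--             current.append([previous[i][0], previous[i][1]-1])
--     return current
--
-- def function(A):
--     steps = [[] for _ in range(len(A))]
--     steps[0].append([1, A[0]])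
--
--     for i in range(1, len(A)):
--         yes_table = []
--         if A[i] > 0:
--             yes_table = yes(steps[i-1], A[i])
--         no_table = no(steps[i-1])
--         yes_table.extend(no_table)
--         steps[i] = yes_table
--
--     if not steps[-2]:
--         return None
--     else:
--         return min(steps[-2][i][0] for i in range(len(steps[-2])))
-- ===== SOURCE B (Python) =====
-- def function(A):
--     # Knapsack-style DP table indexed by step count: dp[j] = the maximum value
--     # reachable at the current position with j+1 steps (None if unreachable).
--     n = len(A)
--     dp = [A[0]]
--     for i in range(1, n - 1):
--         ai = A[i]
--         m = len(dp) + (1 if ai > 0 else 0)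
--         new = []
--         for j in range(m):
--             stay = dp[j] - 1 if j < len(dp) and dp[j] is not None and dp[j] - 1 > 0 else None
--             take = dp[j - 1] + ai - 1 if ai > 0 and j >= 1 and dp[j - 1] is not None and dp[j - 1] + ai - 1 > 0 else None
--             new.append(stay if take is None else take if stay is None else max(stay, take))
--         dp = new
--     for j, v in enumerate(dp):
--         if v is not None:
--             return j + 1
--     return None
-- ===== Notes on version B (the rewrite author's own statement) =====
-- stated objective: alternative
-- what changed: B replaces A's path-enumeration DP (a list with one [steps,value] entry per surviving path, built by two helper passes into a full steps table) with a knapsack-style DP table indexed by step count, keeping only the maximum reachable value per count (dominance: a larger value survives every future that a smaller one does), then returning the first reachable count.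
import Mathlib
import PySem

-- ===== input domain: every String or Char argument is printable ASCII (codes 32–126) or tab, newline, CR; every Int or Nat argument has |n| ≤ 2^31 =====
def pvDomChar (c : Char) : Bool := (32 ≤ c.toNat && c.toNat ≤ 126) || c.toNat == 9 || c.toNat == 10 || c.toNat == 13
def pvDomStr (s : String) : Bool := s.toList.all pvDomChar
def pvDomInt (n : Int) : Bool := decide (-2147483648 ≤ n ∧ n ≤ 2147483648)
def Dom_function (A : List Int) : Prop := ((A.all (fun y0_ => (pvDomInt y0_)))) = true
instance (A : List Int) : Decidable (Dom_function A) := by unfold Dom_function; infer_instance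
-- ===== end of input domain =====

-- B replaces A's path-enumeration DP (one [steps,value] entry per surviving path) with a
-- knapsack-style table indexed by step count keeping only the maximum value per count
-- (dominance), returning the first reachable count.

-- ===== PORT A =====
def yesT (previous : List (Int × Int)) (val : Int) : List (Int × Int) :=
  previous.foldl (fun current p =>
    if p.2 + val - 1 > 0 then current ++ [(p.1 + 1, p.2 + val - 1)] else current) []

def noT (previous : List (Int × Int)) : List (Int × Int) :=
  previous.foldl (fun current p =>
    if p.2 - 1 > 0 then current ++ [(p.1, p.2 - 1)] else current) []

def function (A : List Int) : Option Int :=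
  let n := A.length
  match PySem.List.pyGet? A 0 with
  | none => none  -- IndexError on [] (outside Pre_)
  | some a0 =>
    -- steps = [[] for _ in range(len(A))]; steps[0].append([1, A[0]])
    let steps : List (List (Int × Int)) := (List.replicate n []).set 0 [(1, a0)]
    let steps := (PySem.List.pyRange 1 (n : Int) 1).foldl (fun steps i =>
      let prev := (PySem.List.pyGet? steps (i - 1)).getD []     -- i-1 always in range here
      let ai := (PySem.List.pyGet? A i).getD 0                  -- i always in range here
      let yes_table := if ai > 0 then yesT prev ai else []
      let no_table := noT prev
      steps.set i.toNat (yes_table ++ no_table)) steps          -- i ≥ 1, so toNat is exact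
    match PySem.List.pyGet? steps (-2) with
    | none => none  -- IndexError on a 1-element list (outside Pre_)
    | some last =>
      if last.isEmpty then none
      else PySem.List.min? (last.map (fun p => p.1)) (fun x => x)

-- ===== PORT B =====
-- one position of the dp table: new[j] combines 'stay' (from dp[j]) and 'take' (from dp[j-1])
def stepRow (dp : List (Option Int)) (ai : Int) : List (Option Int) :=
  let m := dp.length + (if ai > 0 then 1 else 0)
  (List.range m).map (fun j =>
    let stay : Option Int := match dp[j]? with
      | some (some v) => if v - 1 > 0 then some (v - 1) else none
      | _ => none
    let take : Option Int := if ai > 0 ∧ 1 ≤ j then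
        (match dp[j - 1]? with
          | some (some v) => if v + ai - 1 > 0 then some (v + ai - 1) else none
          | _ => none)
      else none
    match stay, take with
    | s, none => s
    | none, t => t
    | some s, some t => some (max s t))

-- the final 'for j, v in enumerate(dp): if v is not None: return j + 1'
def firstSome : List (Option Int) → Int → Option Int
  | [], _ => none
  | none :: t, j => firstSome t (j + 1)
  | some _ :: _, j => some (j + 1)

def function_alt (A : List Int) : Option Int :=
  let n := A.length
  match PySem.List.pyGet? A 0 with
  | none => none  -- IndexError on []
  | some a0 =>
    let dp : List (Option Int) := [some a0]
    let dp := (PySem.List.pyRange 1 ((n : Int) - 1) 1).foldl (fun dp i =>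
      stepRow dp ((PySem.List.pyGet? A i).getD 0)) dp           -- i always in range here
    firstSome dp 0

-- ===== PRECONDITION & SPEC =====
-- Pre_ excludes only lists of length < 2, on which A raises IndexError (A[0] or steps[-2]).
def Pre_function (A : List Int) : Prop := 2 ≤ A.length
instance (A : List Int) : Decidable (Pre_function A) := by unfold Pre_function; infer_instance
def pvWitness_function : List Int := [2, -1, 3]

def Spec_function (A : List Int) (out : Option Int) : Prop := out = function_alt A
instance (A : List Int) (out : Option Int) : Decidable (Spec_function A out) := by unfold Spec_function; infer_instance

-- ===== CLAIM (what is proved, stated in full; the proofs are below) =====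
def Claim_equal_function : Prop := ∀ (A : List Int), Dom_function A → Pre_function A → Spec_function A (function A)

-- ===== LEMMAS AND PROOFS =====

-- A's value at index k, as the ports read it
def aAt (A : List Int) (k : Nat) : Int := (PySem.List.pyGet? A (k : Int)).getD 0

-- A's one-step transition on a state list
def stepA (L : List (Int × Int)) (ai : Int) : List (Int × Int) :=
  (if ai > 0 then yesT L ai else []) ++ noT L

-- A's loop body
def bodyA (A : List Int) (steps : List (List (Int × Int))) (i : Int) : List (List (Int × Int)) :=
  let prev := (PySem.List.pyGet? steps (i - 1)).getD []
  let ai := (PySem.List.pyGet? A i).getD 0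
  let yes_table := if ai > 0 then yesT prev ai else []
  let no_table := noT prev
  steps.set i.toNat (yes_table ++ no_table)

-- B's loop body
def bodyB (A : List Int) (dp : List (Option Int)) (i : Int) : List (Option Int) :=
  stepRow dp ((PySem.List.pyGet? A i).getD 0)

-- the state list A keeps at position k
def LA (A : List Int) (a0 : Int) : Nat → List (Int × Int)
  | 0 => [(1, a0)]
  | k + 1 => stepA (LA A a0 k) (aAt A (k + 1))

-- the dp row B keeps at position k
def DB (A : List Int) (a0 : Int) : Nat → List (Option Int)
  | 0 => [some a0]
  | k + 1 => stepRow (DB A a0 k) (aAt A (k + 1))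

-- A's steps table after the loop has processed indices 1..k-1
def tblA (A : List Int) (a0 : Int) (n k : Nat) : List (List (Int × Int)) :=
  (List.range n).map (fun j => if j < k then LA A a0 j else [])

-- the values of the states with step count c
def valsC (L : List (Int × Int)) (c : Int) : List Int :=
  (L.filter (fun p => p.1 == c)).map Prod.snd

-- 'if x is None … else …' combination of the two dp candidates, and a shifted positive filter
def comb (s t : Option Int) : Option Int :=
  match s, t with
  | s', none => s'
  | none, t' => t'
  | some a, some b => some (max a b)

def shiftPos (o : Option Int) (d : Int) : Option Int :=
  match o with
  | none => none
  | some m => if m + d > 0 then some (m + d) else none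

-- the invariant tying B's dp row to A's state list
def InvK (A : List Int) (a0 : Int) (k : Nat) : Prop :=
  (∀ j : Nat, (DB A a0 k).getD j none = (valsC (LA A a0 k) ((j : Int) + 1)).max?) ∧
  (∀ p ∈ LA A a0 k, 1 ≤ p.1)

theorem mem_stepA (L : List (Int × Int)) (ai : Int) (q : Int × Int) :
    q ∈ stepA L ai ↔ ∃ p ∈ L, (ai > 0 ∧ p.2 + ai - 1 > 0 ∧ q = (p.1 + 1, p.2 + ai - 1)) ∨ (p.2 - 1 > 0 ∧ q = (p.1, p.2 - 1)) := by
  unfold stepA yesT noT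
  rw [PySem.List.foldl_append_ite (p := fun p : Int × Int => p.2 + ai - 1 > 0) (f := fun p : Int × Int => (p.1 + 1, p.2 + ai - 1)),
      PySem.List.foldl_append_ite (p := fun p : Int × Int => p.2 - 1 > 0) (f := fun p : Int × Int => (p.1, p.2 - 1))]
  by_cases hai : ai > 0 <;>
    simp [hai, List.mem_append, List.mem_map, List.mem_filter] <;> aesop

theorem mem_valsC (L : List (Int × Int)) (c v : Int) : v ∈ valsC L c ↔ (c, v) ∈ L := by
  simp only [valsC, List.mem_map, List.mem_filter, beq_iff_eq]
  constructor
  · rintro ⟨p, ⟨hp, rfl⟩, rfl⟩; exact hp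
  · intro h; exact ⟨(c, v), ⟨h, rfl⟩, rfl⟩

theorem max?_congr_mem (l₁ l₂ : List Int) (h : ∀ x, x ∈ l₁ ↔ x ∈ l₂) : l₁.max? = l₂.max? := by
  rcases h₁ : l₁.max? with _ | m
  · rw [List.max?_eq_none_iff] at h₁
    subst h₁
    symm
    rw [List.max?_eq_none_iff]
    exact List.eq_nil_iff_forall_not_mem.mpr (fun x hx => by simp [← h x] at hx)
  · rw [List.max?_eq_some_iff] at h₁
    symm
    rw [List.max?_eq_some_iff]
    exact ⟨(h m).mp h₁.1, fun b hb => h₁.2 b ((h b).mpr hb)⟩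

theorem max?_append_comb (l₁ l₂ : List Int) : (l₁ ++ l₂).max? = comb l₁.max? l₂.max? := by
  rcases h₁ : l₁.max? with _ | m₁ <;> rcases h₂ : l₂.max? with _ | m₂
  · rw [List.max?_eq_none_iff] at h₁ h₂; subst h₁; subst h₂; rfl
  · rw [List.max?_eq_none_iff] at h₁; subst h₁; simpa [comb] using h₂
  · rw [List.max?_eq_none_iff] at h₂; subst h₂; simpa [comb] using h₁
  · rw [List.max?_eq_some_iff] at h₁ h₂
    simp only [comb]
    rw [List.max?_eq_some_iff]
    constructor
    · rcases max_cases m₁ m₂ with ⟨he, _⟩ | ⟨he, _⟩ <;> rw [he]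
      · exact List.mem_append_left _ h₁.1
      · exact List.mem_append_right _ h₂.1
    · intro b hb
      rcases List.mem_append.mp hb with hb | hb
      · exact le_max_of_le_left (h₁.2 b hb)
      · exact le_max_of_le_right (h₂.2 b hb)

theorem max?_shift_filter (l : List Int) (d : Int) :
    ((l.map (fun x => x + d)).filter (fun x => decide (0 < x))).max? = shiftPos l.max? d := by
  rcases h : l.max? with _ | m
  · rw [List.max?_eq_none_iff] at h; subst h; rfl
  · rw [List.max?_eq_some_iff] at h
    simp only [shiftPos]
    split_ifs with hpos
    · rw [List.max?_eq_some_iff]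
      constructor
      · rw [List.mem_filter]
        exact ⟨List.mem_map.mpr ⟨m, h.1, rfl⟩, by simpa using hpos⟩
      · intro b hb
        rcases List.mem_filter.mp hb with ⟨hb, _⟩
        rcases List.mem_map.mp hb with ⟨x, hx, rfl⟩
        have := h.2 x hx
        omega
    · rw [List.max?_eq_none_iff, List.filter_eq_nil_iff]
      intro b hb
      rcases List.mem_map.mp hb with ⟨x, hx, rfl⟩
      have := h.2 x hx
      simp only [decide_eq_true_eq]
      omega

theorem stepRow_getD (dp : List (Option Int)) (ai : Int) (j : Nat) :
    (stepRow dp ai).getD j none =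
      comb (shiftPos (dp.getD j none) (-1))
           (if ai > 0 ∧ 1 ≤ j then shiftPos (dp.getD (j - 1) none) (ai - 1) else none) := by
  unfold stepRow
  have hlen : ∀ (k : Nat), dp.getD k none = (dp[k]?).getD none := fun k => rfl
  by_cases hj : j < dp.length + (if ai > 0 then 1 else 0)
  · rw [List.getD, List.getElem?_map, List.getElem?_range hj]
    simp only [Option.map_some, Option.getD_some]
    rw [hlen j, hlen (j - 1)]
    rcases h1 : dp[j]? with _ | o1 <;> rcases h2 : dp[j - 1]? with _ | o2 <;>
      [skip; skip; skip; skip] <;>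
    · simp only [Option.getD_none, Option.getD_some]
      first
      | (rcases o1 with _ | v1 <;> rcases o2 with _ | v2 <;>
          simp only [shiftPos, comb] <;> split_ifs <;> simp_all <;> omega)
      | (try rcases o1 with _ | v1) <;> (try rcases o2 with _ | v2) <;>
          simp only [shiftPos, comb] <;> split_ifs <;> simp_all <;> omega
  · rw [List.getD, List.getElem?_map]
    rw [List.getElem?_eq_none (by simpa using hj)]
    have hout : dp[j]? = none := List.getElem?_eq_none (by omega)
    rw [hlen j, hout]
    by_cases hg : ai > 0 ∧ 1 ≤ j
    · have : dp.length ≤ j - 1 := by rcases hg with ⟨hpos, h1j⟩; simp [if_pos hpos] at hj; omega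
      rw [hlen (j - 1), List.getElem?_eq_none this]
      simp [comb, shiftPos]
    · simp [comb, shiftPos, if_neg hg]

theorem comb_none (s : Option Int) : comb s none = s := by
  cases s <;> rfl

theorem valsC_stepA (L : List (Int × Int)) (ai c : Int) (_hc : ∀ p ∈ L, 1 ≤ p.1) :
    (valsC (stepA L ai) c).max? =
      comb ((((valsC L c).map (fun x => x + (-1))).filter (fun x => decide (0 < x))).max?)
           (if ai > 0 then (((valsC L (c - 1)).map (fun x => x + (ai - 1))).filter (fun x => decide (0 < x))).max? else none) := by
  by_cases hai : ai > 0
  · rw [if_pos hai, ← max?_append_comb]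
    apply max?_congr_mem
    intro v
    rw [mem_valsC, mem_stepA, List.mem_append]
    constructor
    · rintro ⟨p, hp, ⟨_, hpos, heq⟩ | ⟨hpos, heq⟩⟩
      · right
        rw [List.mem_filter]
        refine ⟨List.mem_map.mpr ⟨p.2, (mem_valsC _ _ _).mpr ?_, by
          have : c = p.1 + 1 ∧ v = p.2 + ai - 1 := by
            constructor <;> [exact congrArg Prod.fst heq; exact congrArg Prod.snd heq]
          omega⟩, by
          have : v = p.2 + ai - 1 := congrArg Prod.snd heq
          simpa using (by omega : 0 < v)⟩
        have : c = p.1 + 1 := congrArg Prod.fst heq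
        have hp2 : (p.1, p.2) = p := rfl
        rw [show c - 1 = p.1 by omega, hp2]
        exact hp
      · left
        rw [List.mem_filter]
        have h1 : c = p.1 := congrArg Prod.fst heq
        have h2 : v = p.2 - 1 := congrArg Prod.snd heq
        refine ⟨List.mem_map.mpr ⟨p.2, (mem_valsC _ _ _).mpr ?_, by omega⟩, by simpa using (by omega : 0 < v)⟩
        have hp2 : (p.1, p.2) = p := rfl
        rw [h1, hp2]
        exact hp
    · rintro (hv | hv)
      · rcases List.mem_filter.mp hv with ⟨hv, hpos⟩
        rcases List.mem_map.mp hv with ⟨x, hx, rfl⟩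
        have hmem := (mem_valsC _ _ _).mp hx
        simp only [decide_eq_true_eq] at hpos
        exact ⟨(c, x), hmem, Or.inr ⟨by omega, by simp; omega⟩⟩
      · rcases List.mem_filter.mp hv with ⟨hv, hpos⟩
        rcases List.mem_map.mp hv with ⟨x, hx, rfl⟩
        have hmem := (mem_valsC _ _ _).mp hx
        simp only [decide_eq_true_eq] at hpos
        exact ⟨(c - 1, x), hmem, Or.inl ⟨hai, by omega, by simp; omega⟩⟩
  · rw [if_neg hai, comb_none]
    apply max?_congr_mem
    intro v
    rw [mem_valsC, mem_stepA]
    constructor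
    · rintro ⟨p, hp, ⟨hpos, _, _⟩ | ⟨hpos, heq⟩⟩
      · exact absurd hpos hai
      · rw [List.mem_filter]
        have h1 : c = p.1 := congrArg Prod.fst heq
        have h2 : v = p.2 - 1 := congrArg Prod.snd heq
        refine ⟨List.mem_map.mpr ⟨p.2, (mem_valsC _ _ _).mpr ?_, by omega⟩, by simpa using (by omega : 0 < v)⟩
        have hp2 : (p.1, p.2) = p := rfl
        rw [h1, hp2]
        exact hp
    · intro hv
      rcases List.mem_filter.mp hv with ⟨hv, hpos⟩
      rcases List.mem_map.mp hv with ⟨x, hx, rfl⟩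
      have hmem := (mem_valsC _ _ _).mp hx
      simp only [decide_eq_true_eq] at hpos
      exact ⟨(c, x), hmem, Or.inr ⟨by omega, by simp; omega⟩⟩

theorem valsC_empty_of_lt_one (L : List (Int × Int)) (c : Int) (hc : ∀ p ∈ L, 1 ≤ p.1) (h : c < 1) :
    valsC L c = [] := by
  have hf : L.filter (fun p => p.1 == c) = [] := by
    rw [List.filter_eq_nil_iff]
    intro p hp
    have := hc p hp
    simp only [beq_iff_eq]
    omega
  simp [valsC, hf]

theorem inv_step (A : List Int) (a0 : Int) (k : Nat) (h : InvK A a0 k) : InvK A a0 (k + 1) := by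
  obtain ⟨h1, h2⟩ := h
  constructor
  · intro j
    have hstep : DB A a0 (k + 1) = stepRow (DB A a0 k) (aAt A (k + 1)) := rfl
    have hLA : LA A a0 (k + 1) = stepA (LA A a0 k) (aAt A (k + 1)) := rfl
    rw [hstep, hLA, stepRow_getD, valsC_stepA _ _ _ h2, max?_shift_filter, max?_shift_filter,
        h1 j]
    congr 1
    by_cases hai : aAt A (k + 1) > 0
    · by_cases hj : 1 ≤ j
      · rw [if_pos ⟨hai, hj⟩, if_pos hai, h1 (j - 1),
            show ((j : Int) + 1) - 1 = ((j - 1 : Nat) : Int) + 1 from by omega]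
      · rw [if_neg (by tauto), if_pos hai]
        have hj0 : j = 0 := by omega
        subst hj0
        rw [valsC_empty_of_lt_one _ _ h2 (by omega)]
        rfl
    · rw [if_neg (by tauto), if_neg hai]
  · intro p hp
    have hLA : LA A a0 (k + 1) = stepA (LA A a0 k) (aAt A (k + 1)) := rfl
    rw [hLA, mem_stepA] at hp
    obtain ⟨q, hq, hc⟩ := hp
    have := h2 q hq
    rcases hc with ⟨_, _, rfl⟩ | ⟨_, rfl⟩ <;> simp <;> omega

theorem inv_all (A : List Int) (a0 : Int) (k : Nat) : InvK A a0 k := by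
  induction k with
  | zero =>
    constructor
    · intro j
      match j with
      | 0 => simp [DB, LA, valsC]
      | j + 1 =>
        show (none : Option Int) = _
        rw [valsC, List.filter_eq_nil_iff.mpr (by
          intro p hp
          simp only [LA, List.mem_singleton] at hp
          subst hp
          simp only [beq_iff_eq]
          intro hc
          omega)]
        rfl
    · intro p hp
      simp only [LA, List.mem_singleton] at hp
      subst hp
      norm_num
  | succ k ih => exact inv_step A a0 k ih

-- ======= evaluation of the two ports into LA / DB =======

theorem tbl_init (A : List Int) (a0 : Int) (n : Nat) (hn : 1 ≤ n) :
    (List.replicate n ([] : List (Int × Int))).set 0 [(1, a0)] = tblA A a0 n 1 := by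
  apply List.ext_getElem
  · simp [tblA]
  · intro j hj hj'
    simp only [tblA, List.getElem_map, List.getElem_range]
    match j with
    | 0 =>
      rw [List.getElem_set_self (by simpa using hj)]
      simp [LA]
    | j + 1 =>
      rw [List.getElem_set_ne (by omega)]
      simp

theorem bodyA_tbl (A : List Int) (a0 : Int) (n j : Nat) (h2 : j + 1 < n) :
    bodyA A (tblA A a0 n (j + 1)) ((j + 1 : Nat) : Int) = tblA A a0 n (j + 2) := by
  unfold bodyA
  have e1 : ((j + 1 : Nat) : Int) - 1 = ((j : Nat) : Int) := by push_cast; ring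
  rw [e1, PySem.List.pyGet?_natCast]
  have hjn : j < n := by omega
  simp only [tblA, List.getElem?_map, List.getElem?_range hjn, Option.map_some, Option.getD_some,
    Int.toNat_natCast, if_pos (Nat.lt_succ_self j)]
  have hai : (PySem.List.pyGet? A ((j + 1 : Nat) : Int)).getD 0 = aAt A (j + 1) := rfl
  rw [hai]
  have hX : (if aAt A (j + 1) > 0 then yesT (LA A a0 j) (aAt A (j + 1)) else []) ++ noT (LA A a0 j)
      = LA A a0 (j + 1) := rfl
  rw [hX]
  apply List.ext_getElem
  · simp
  · intro i hi hi'
    simp only [List.length_set, List.length_map, List.length_range] at hi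
    by_cases hij : i = j + 1
    · subst hij
      rw [List.getElem_set_self (by simpa using h2)]
      simp [List.getElem_map, List.getElem_range, show j + 1 < j + 2 by omega]
    · rw [List.getElem_set_ne (by omega)]
      simp only [List.getElem_map, List.getElem_range]
      have : i < j + 1 ↔ i < j + 2 := by omega
      simp [this]

theorem foldA_tbl (A : List Int) (a0 : Int) (n : Nat) :
    ∀ (m j : Nat), j + 1 + m = n →
      (PySem.List.pyRange ((j + 1 : Nat) : Int) (n : Int) 1).foldl (bodyA A) (tblA A a0 n (j + 1)) = tblA A a0 n n := by
  intro m
  induction m with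
  | zero =>
    intro j hj
    rw [PySem.List.pyRange_one_eq_nil (by omega)]
    rw [show j + 1 = n by omega]
    rfl
  | succ m ih =>
    intro j hj
    rw [PySem.List.pyRange_one_cons (by exact_mod_cast (by omega : ((j + 1 : Nat) : Int) < (n : Nat)))]
    rw [List.foldl_cons, bodyA_tbl A a0 n j (by omega)]
    have e : ((j + 1 : Nat) : Int) + 1 = ((j + 2 : Nat) : Int) := by push_cast; ring
    rw [e]
    exact ih (j + 1) (by omega)

theorem foldB_DB (A : List Int) (a0 : Int) (n : Nat) (_hn : 2 ≤ n) :
    ∀ (m j : Nat), j + 1 + m = n - 1 →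
      (PySem.List.pyRange ((j + 1 : Nat) : Int) ((n : Int) - 1) 1).foldl (bodyB A) (DB A a0 j) = DB A a0 (n - 2) := by
  have en : (n : Int) - 1 = ((n - 1 : Nat) : Int) := by omega
  intro m
  induction m with
  | zero =>
    intro j hj
    rw [en, PySem.List.pyRange_one_eq_nil (by exact_mod_cast (by omega : ((n - 1 : Nat) : Int) ≤ ((j + 1 : Nat) : Int)))]
    rw [show j = n - 2 by omega]
    rfl
  | succ m ih =>
    intro j hj
    rw [en, PySem.List.pyRange_one_cons (by exact_mod_cast (by omega : ((j + 1 : Nat) : Int) < ((n - 1 : Nat) : Int)))]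
    rw [List.foldl_cons]
    have hb : bodyB A (DB A a0 j) ((j + 1 : Nat) : Int) = DB A a0 (j + 1) := rfl
    rw [hb]
    have e : ((j + 1 : Nat) : Int) + 1 = ((j + 2 : Nat) : Int) := by push_cast; ring
    rw [e, ← en]
    exact ih (j + 1) (by omega)

theorem function_eval (a : Int) (t : List Int) (h : 1 ≤ t.length) :
    function (a :: t) =
      (if (LA (a :: t) a (t.length - 1)).isEmpty then none
       else PySem.List.min? ((LA (a :: t) a (t.length - 1)).map (fun p => p.1)) (fun x => x)) := by
  have hfold : (PySem.List.pyRange 1 (((t.length + 1 : Nat) : Int)) 1).foldl (bodyA (a :: t))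
      ((List.replicate (t.length + 1) ([] : List (Int × Int))).set 0 [(1, a)])
      = tblA (a :: t) a (t.length + 1) (t.length + 1) := by
    rw [tbl_init (a :: t) a (t.length + 1) (by omega)]
    have e0 : ((0 + 1 : Nat) : Int) = 1 := by norm_num
    have := foldA_tbl (a :: t) a (t.length + 1) t.length 0 (by omega)
    rw [e0] at this
    exact this
  have hget : PySem.List.pyGet? (tblA (a :: t) a (t.length + 1) (t.length + 1)) (-2)
      = some (LA (a :: t) a (t.length - 1)) := by
    rw [PySem.List.pyGet?_neg_ofNat _ 2 (by norm_num) (by simp [tblA]; omega)]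
    simp only [tblA, List.length_map, List.length_range]
    rw [List.getElem?_map, List.getElem?_range (show t.length + 1 - 2 < t.length + 1 by omega)]
    simp only [Option.map_some]
    rw [if_pos (show t.length + 1 - 2 < t.length + 1 by omega),
        show t.length + 1 - 2 = t.length - 1 from by omega]
  simp only [function, PySem.List.pyGet?_zero_cons]
  show (match PySem.List.pyGet?
          ((PySem.List.pyRange 1 (((t.length + 1 : Nat)) : Int) 1).foldl (bodyA (a :: t))
            ((List.replicate (t.length + 1) ([] : List (Int × Int))).set 0 [(1, a)])) (-2) with
        | none => none
        | some last => if last.isEmpty then none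
                       else PySem.List.min? (last.map (fun p : Int × Int => p.1)) (fun x => x)) = _
  rw [hfold, hget]

theorem function_alt_eval (a : Int) (t : List Int) (h : 1 ≤ t.length) :
    function_alt (a :: t) = firstSome (DB (a :: t) a (t.length - 1)) 0 := by
  have hfold : (PySem.List.pyRange 1 (((t.length + 1 : Nat) : Int) - 1) 1).foldl (bodyB (a :: t))
      (DB (a :: t) a 0) = DB (a :: t) a (t.length - 1) := by
    have e0 : ((0 + 1 : Nat) : Int) = 1 := by norm_num
    have := foldB_DB (a :: t) a (t.length + 1) (by omega) (t.length - 1) 0 (by omega)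
    rw [e0] at this
    exact this
  simp only [function_alt, PySem.List.pyGet?_zero_cons]
  show firstSome ((PySem.List.pyRange 1 (((t.length + 1 : Nat) : Int) - 1) 1).foldl (bodyB (a :: t))
      (DB (a :: t) a 0)) 0 = _
  rw [hfold]

-- ======= the final scan =======

theorem firstSome_none (l : List (Option Int)) (s : Int) (h : ∀ o ∈ l, o = none) :
    firstSome l s = none := by
  induction l generalizing s with
  | nil => rfl
  | cons o t ih =>
    have ho := h o List.mem_cons_self
    subst ho
    exact ih (s + 1) (fun o ho => h o (List.mem_cons_of_mem _ ho))

theorem firstSome_find (l : List (Option Int)) (s : Int) (j₀ : Nat) (hj : j₀ < l.length)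
    (hsome : l.getD j₀ none ≠ none) (hmin : ∀ i, i < j₀ → l.getD i none = none) :
    firstSome l s = some (s + (j₀ : Int) + 1) := by
  induction l generalizing s j₀ with
  | nil => simp at hj
  | cons o t ih =>
    match j₀ with
    | 0 =>
      simp only [List.getD_cons_zero] at hsome
      rcases o with _ | v
      · exact absurd rfl hsome
      · simp [firstSome]
    | j + 1 =>
      have h0 := hmin 0 (by omega)
      simp only [List.getD_cons_zero] at h0
      subst h0
      show firstSome t (s + 1) = _
      rw [ih (s + 1) j (by simpa using hj) (by simpa using hsome)
          (fun i hi => by simpa using hmin (i + 1) (by omega))]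
      congr 1
      push_cast
      ring

-- ===== VERDICT (by name: the statement is the Claim_ definition above) =====
theorem function_spec : Claim_equal_function := by
  intro A _ hpre
  unfold Pre_function at hpre
  unfold Spec_function
  match A with
  | [] => simp at hpre
  | a :: t =>
    have ht : 1 ≤ t.length := by simp at hpre; omega
    rw [function_eval a t ht, function_alt_eval a t ht]
    obtain ⟨h1, h2⟩ := inv_all (a :: t) a (t.length - 1)
    set L := LA (a :: t) a (t.length - 1) with hL
    set dp := DB (a :: t) a (t.length - 1) with hdp
    rcases hE : L.isEmpty with _ | _
    · -- L nonempty: A returns the minimum count, B the first reachable dp index + 1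
      rw [if_neg (by simp)]
      have hne : L ≠ [] := by simpa [List.isEmpty_iff] using hE
      rcases hmin : PySem.List.min? (L.map (fun p => p.1)) (fun x => x) with _ | c₀
      · rw [PySem.List.min?_eq_none_iff] at hmin
        exact absurd (List.map_eq_nil_iff.mp hmin) hne
      · have hc₀mem := PySem.List.min?_mem hmin
        have hc₀min := PySem.List.min?_isMin hmin
        rcases List.mem_map.mp hc₀mem with ⟨p, hp, hpc⟩
        have hc₀1 : 1 ≤ c₀ := hpc ▸ h2 p hp
        have hjc : ((c₀ - 1).toNat : Int) = c₀ - 1 := by omega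
        set j₀ : Nat := (c₀ - 1).toNat with hj₀
        have hcast : (j₀ : Int) + 1 = c₀ := by omega
        have hvals : dp.getD j₀ none = (valsC L c₀).max? := by rw [h1 j₀, hcast]
        have hvne : valsC L c₀ ≠ [] := by
          intro hnil
          have : p.2 ∈ valsC L c₀ := (mem_valsC L c₀ p.2).mpr (by rw [← hpc]; exact hp)
          rw [hnil] at this
          simp at this
        have hsome : dp.getD j₀ none ≠ none := by
          rw [hvals]
          intro hn
          exact hvne (List.max?_eq_none_iff.mp hn)
        have hjlen : j₀ < dp.length := by
          by_contra hge
          exact hsome (by rw [List.getD, List.getElem?_eq_none (by omega)]; rfl)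
        have hmin' : ∀ i, i < j₀ → dp.getD i none = none := by
          intro i hi
          rw [h1 i]
          rw [List.max?_eq_none_iff]
          by_contra hnn
          rcases List.exists_mem_of_ne_nil _ hnn with ⟨v, hv⟩
          have hmem := (mem_valsC L _ v).mp hv
          have : (i : Int) + 1 ∈ L.map (fun p => p.1) := List.mem_map.mpr ⟨_, hmem, rfl⟩
          have := hc₀min _ this
          omega
        rw [firstSome_find dp 0 j₀ hjlen hsome hmin', zero_add, hcast]
        exact hmin
    · -- L empty: A returns none; every dp entry is none, so B's scan returns none
      rw [if_pos rfl]
      have hLnil : L = [] := List.isEmpty_iff.mp hE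
      symm
      apply firstSome_none
      intro o ho
      rcases List.mem_iff_getElem.mp ho with ⟨j, hjl, rfl⟩
      have := h1 j
      rw [hLnil] at this
      have hv : valsC ([] : List (Int × Int)) ((j : Int) + 1) = [] := rfl
      rw [hv] at this
      have : dp.getD j none = none := this
      rwa [List.getD, List.getElem?_eq_getElem hjl, Option.getD_some] at this
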